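-- pv_equiv track=rewrite | github.com/eirikdyb/AdventOfCode-2022 | luke 02.py | strat_list
-- ===== SOURCE A (Python) =====
-- def strat_list(liste1, liste2):
--     new_strat = []
--     for i in range(len(liste1)):
--         if liste2[i] == 'X': #Loss
--             if liste1[i] == 'A':
--                 new_strat.append("Z")
--             elif liste1[i] == 'B':
--                 new_strat.append("X")
--             elif liste1[i] == 'C':
--                 new_strat.append("Y")
--
--         elif liste2[i] == 'Y': #draw
--             if liste1[i] == 'A':
--                 new_strat.append("X")
--             elif liste1[i] == 'B':
--                 new_strat.append("Y")
--             elif liste1[i] == 'C':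
--                 new_strat.append("Z")
--
--         elif liste2[i] == 'Z': #Win
--             if liste1[i] == 'A':
--                 new_strat.append("Y")
--             elif liste1[i] == 'B':
--                 new_strat.append("Z")
--             elif liste1[i] == 'C':
--                 new_strat.append("X")
--     return new_strat
-- ===== SOURCE B (Python) =====
-- def strat_list(liste1, liste2):
--     shape = {'A': 0, 'B': 1, 'C': 2}
--     outcome = {'X': 0, 'Y': 1, 'Z': 2}
--     new_strat = []
--     for i in range(len(liste1)):
--         o = outcome.get(liste2[i])
--         s = shape.get(liste1[i])
--         if s is not None and o is not None:
--             new_strat.append("XYZ"[(s + o - 1) % 3])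
--     return new_strat
-- ===== Notes on version B (the rewrite author's own statement) =====
-- stated objective: simpler
-- what changed: Replaces the 9-way nested if/elif chain with two index dictionaries and the closed form 'XYZ'[(shape+outcome-1)%3], skipping rounds whose codes are not found just as A's fall-through does.
import Mathlib
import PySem

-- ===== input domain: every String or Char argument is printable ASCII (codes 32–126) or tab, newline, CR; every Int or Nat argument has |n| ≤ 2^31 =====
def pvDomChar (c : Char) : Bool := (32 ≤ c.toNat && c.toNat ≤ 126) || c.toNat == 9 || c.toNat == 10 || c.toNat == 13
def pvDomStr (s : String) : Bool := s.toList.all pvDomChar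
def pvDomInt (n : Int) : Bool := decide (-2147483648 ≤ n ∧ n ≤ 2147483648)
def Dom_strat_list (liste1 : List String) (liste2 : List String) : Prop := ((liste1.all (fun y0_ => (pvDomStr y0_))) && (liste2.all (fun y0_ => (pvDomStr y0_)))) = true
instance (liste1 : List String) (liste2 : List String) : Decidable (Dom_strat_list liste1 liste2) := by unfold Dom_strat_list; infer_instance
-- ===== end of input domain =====

-- B replaces A's 9-way nested if/elif chain with two index dictionaries and the closed form "XYZ"[(s+o-1)%3] (objective: simpler).

-- ===== PORT A =====
-- Literal port of A's loop; liste2[i] is read via pyGetD with default "": under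
-- Pre_ (no IndexError) the index is always in range, so the default is never used.
def strat_list (liste1 : List String) (liste2 : List String) : List String :=
  (PySem.List.pyRange 0 (liste1.length : Int) 1).foldl (fun new_strat i =>
    let b := PySem.List.pyGetD liste2 i ""
    let a := PySem.List.pyGetD liste1 i ""
    if b == "X" then
      if a == "A" then new_strat ++ ["Z"]
      else if a == "B" then new_strat ++ ["X"]
      else if a == "C" then new_strat ++ ["Y"]
      else new_strat
    else if b == "Y" then
      if a == "A" then new_strat ++ ["X"]
      else if a == "B" then new_strat ++ ["Y"]
      else if a == "C" then new_strat ++ ["Z"]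
      else new_strat
    else if b == "Z" then
      if a == "A" then new_strat ++ ["Y"]
      else if a == "B" then new_strat ++ ["Z"]
      else if a == "C" then new_strat ++ ["X"]
      else new_strat
    else new_strat) []

-- ===== PORT B =====
def pvShape : PySem.Dict String Int := PySem.Dict.mk [("A", 0), ("B", 1), ("C", 2)]
def pvOutcome : PySem.Dict String Int := PySem.Dict.mk [("X", 0), ("Y", 1), ("Z", 2)]

def strat_list_alt (liste1 : List String) (liste2 : List String) : List String :=
  (PySem.List.pyRange 0 (liste1.length : Int) 1).foldl (fun new_strat i =>
    let o := PySem.Dict.get? pvOutcome (PySem.List.pyGetD liste2 i "")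
    let s := PySem.Dict.get? pvShape (PySem.List.pyGetD liste1 i "")
    match s, o with
    | some s, some o =>
        new_strat ++ [((PySem.Str.pyGet? "XYZ" (PySem.Int.mod (s + o - 1) 3)).map (fun c => String.ofList [c])).getD ""]
    | _, _ => new_strat) []

-- ===== PRECONDITION & SPEC =====
-- Pre_ excludes exactly the inputs where A raises IndexError: liste2 shorter than liste1.
def Pre_strat_list (liste1 : List String) (liste2 : List String) : Prop :=
  liste1.length ≤ liste2.length
instance (liste1 : List String) (liste2 : List String) : Decidable (Pre_strat_list liste1 liste2) := by unfold Pre_strat_list; infer_instance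
def pvWitness_strat_list : List String × List String := (["A", "B"], ["X", "Z"])

def Spec_strat_list (liste1 : List String) (liste2 : List String) (out : List String) : Prop := out = strat_list_alt liste1 liste2
instance (liste1 : List String) (liste2 : List String) (out : List String) : Decidable (Spec_strat_list liste1 liste2 out) := by unfold Spec_strat_list; infer_instance

-- ===== CLAIM (what is proved, stated in full; the proofs are below) =====
def Claim_equal_strat_list : Prop := ∀ (liste1 : List String) (liste2 : List String), Dom_strat_list liste1 liste2 → Pre_strat_list liste1 liste2 → Spec_strat_list liste1 liste2 (strat_list liste1 liste2)

-- ===== LEMMAS AND PROOFS =====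

-- the dict lookups of B, characterised as if-chains over the element value
lemma pv_shape_get (a : String) : PySem.Dict.get? pvShape a =
    if a = "A" then some 0 else if a = "B" then some 1 else if a = "C" then some 2 else none := by
  split_ifs <;> subst_vars <;> simp [pvShape, PySem.Dict.get?, beq_iff_eq, Ne.symm, *]

lemma pv_outcome_get (b : String) : PySem.Dict.get? pvOutcome b =
    if b = "X" then some 0 else if b = "Y" then some 1 else if b = "Z" then some 2 else none := by
  split_ifs <;> subst_vars <;> simp [pvOutcome, PySem.Dict.get?, beq_iff_eq, Ne.symm, *]

-- the two loop bodies agree at every pair of element values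
lemma pv_step_eq (ns : List String) (a b : String) :
    (if b == "X" then
      if a == "A" then ns ++ ["Z"]
      else if a == "B" then ns ++ ["X"]
      else if a == "C" then ns ++ ["Y"]
      else ns
    else if b == "Y" then
      if a == "A" then ns ++ ["X"]
      else if a == "B" then ns ++ ["Y"]
      else if a == "C" then ns ++ ["Z"]
      else ns
    else if b == "Z" then
      if a == "A" then ns ++ ["Y"]
      else if a == "B" then ns ++ ["Z"]
      else if a == "C" then ns ++ ["X"]
      else ns
    else ns) =
    (match PySem.Dict.get? pvShape a, PySem.Dict.get? pvOutcome b with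
    | some s, some o =>
        ns ++ [((PySem.Str.pyGet? "XYZ" (PySem.Int.mod (s + o - 1) 3)).map (fun c => String.ofList [c])).getD ""]
    | _, _ => ns) := by
  rw [pv_shape_get, pv_outcome_get]
  simp only [beq_iff_eq]
  split_ifs <;> simp_all

theorem strat_list_spec : Claim_equal_strat_list := by
  intro liste1 liste2 _ _
  show strat_list liste1 liste2 = strat_list_alt liste1 liste2
  unfold strat_list strat_list_alt
  apply PySem.List.foldl_congr_mem
  intro ns i _
  exact pv_step_eq ns (PySem.List.pyGetD liste1 i "") (PySem.List.pyGetD liste2 i "")
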